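-- pv_equiv track=rewrite | github.com/hschennum/CogSciFinalProject | unused/generated_reference/DFS2.py | countdown_dfs
-- ===== SOURCE A (Python) =====
-- from collections import deque
--
-- def countdown_dfs(numbers):
--     # We'll use BFS/DFS with a queue/stack to process states
--     # Each state is a set of available numbers
--     # We'll track all reachable numbers
--     reachable = set()
--
--     # Use a stack for DFS
--     stack = deque()
--
--     # Start with all numbers available
--     initial_state = tuple(sorted(numbers))
--     stack.append(initial_state)
--     visited = set()
--     visited.add(initial_state)
--
--     while stack:
--         current_state = stack.pop()
--         current_numbers = list(current_state)
--
--         # Add all current numbers to reachable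
--         for num in current_numbers:
--             if 100 <= num <= 999:
--                 reachable.add(num)
--
--         # If we have only one number, we can't combine further
--         if len(current_numbers) == 1:
--             continue
--
--         # Try all pairs of numbers
--         for i in range(len(current_numbers)):
--             for j in range(i + 1, len(current_numbers)):
--                 a, b = current_numbers[i], current_numbers[j]
--
--                 # Generate new numbers from a and b
--                 new_numbers = []
--
--                 # Addition
--                 new_numbers.append(a + b)
--
--                 # Subtraction (positive results only)
--                 if a > b:
--                     new_numbers.append(a - b)
--                 elif b > a:
--                     new_numbers.append(b - a)
--
--                 # Multiplication
--                 new_numbers.append(a * b)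
--
--                 # Division (integer results only)
--                 if b != 0 and a % b == 0:
--                     new_numbers.append(a // b)
--                 if a != 0 and b % a == 0:
--                     new_numbers.append(b // a)
--
--                 # Create new state for each valid operation result
--                 for new_num in new_numbers:
--                     if new_num <= 0:  # Only positive integers
--                         continue
--
--                     # Create new set of numbers
--                     remaining_numbers = []
--                     for k in range(len(current_numbers)):
--                         if k != i and k != j:
--                             remaining_numbers.append(current_numbers[k])
--                     remaining_numbers.append(new_num)
--
--                     new_state = tuple(sorted(remaining_numbers))
--
--                     if new_state not in visited:
--                         visited.add(new_state)
--                         stack.append(new_state)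
--
--     return reachable
-- ===== SOURCE B (Python) =====
-- def countdown_dfs(numbers):
--     reachable = set()
--     visited = set()
--
--     def combos(a, b):
--         # all numbers producible from the pair (a, b), positives only
--         out = [a + b]
--         if a != b:
--             out.append(abs(a - b))
--         out.append(a * b)
--         if b != 0 and a % b == 0:
--             out.append(a // b)
--         if a != 0 and b % a == 0:
--             out.append(b // a)
--         return [c for c in out if c > 0]
--
--     def explore(state):
--         # collect, generate the not-yet-seen successor states, recurse (LIFO)
--         for num in state:
--             if 100 <= num <= 999:
--                 reachable.add(num)
--         if len(state) == 1:
--             return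
--         fresh = []
--         for i, a in enumerate(state):
--             for j in range(i + 1, len(state)):
--                 b = state[j]
--                 rest = state[:i] + state[i + 1:j] + state[j + 1:]
--                 for c in combos(a, b):
--                     ns = tuple(sorted(rest + (c,)))
--                     if ns not in visited:
--                         visited.add(ns)
--                         fresh.append(ns)
--         while fresh:
--             explore(fresh.pop())
--
--     start = tuple(sorted(numbers))
--     visited.add(start)
--     explore(start)
--     return reachable
-- ===== Notes on version B (the rewrite author's own statement) =====
-- stated objective: alternative
-- what changed: The explicit deque/while stack machine is replaced by a recursive explore() sharing the visited/reachable sets through closure: each call collects its state's 100..999 numbers, generates the unseen successor states via a combos(a,b) helper (abs-based subtraction, comprehension filter) and tuple slices instead of A's branch-ordered candidates and inner k-filter loop, and recurses on them LIFO; depth is bounded by len(numbers).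
import Mathlib
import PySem

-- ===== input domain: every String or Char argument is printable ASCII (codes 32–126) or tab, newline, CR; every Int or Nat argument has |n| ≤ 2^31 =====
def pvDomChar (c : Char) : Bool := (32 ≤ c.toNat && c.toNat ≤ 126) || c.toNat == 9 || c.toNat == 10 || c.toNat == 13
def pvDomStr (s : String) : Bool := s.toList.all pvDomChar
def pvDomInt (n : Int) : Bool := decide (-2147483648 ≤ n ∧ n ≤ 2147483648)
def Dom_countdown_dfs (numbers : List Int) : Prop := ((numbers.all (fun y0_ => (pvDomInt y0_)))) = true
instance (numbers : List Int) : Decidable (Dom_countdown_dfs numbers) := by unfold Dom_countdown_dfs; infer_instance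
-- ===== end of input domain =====

-- B replaces A's explicit deque stack machine by a recursive explore function threading the
-- visited/reachable sets, with a candidate helper and tuple slices; same cost, no speed claim.

-- ===== PORT A =====
-- the list of combination results A builds for the pair (a, b)
def pvNewNumbersA (a b : Int) : List Int :=
  let newNumbers := [a + b]
  let newNumbers := if a > b then newNumbers ++ [a - b]
    else if b > a then newNumbers ++ [b - a] else newNumbers
  let newNumbers := newNumbers ++ [a * b]
  let newNumbers := if b ≠ 0 ∧ PySem.Int.mod a b = 0 then newNumbers ++ [PySem.Int.floordiv a b]
    else newNumbers
  if a ≠ 0 ∧ PySem.Int.mod b a = 0 then newNumbers ++ [PySem.Int.floordiv b a] else newNumbers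

-- A's inner k-loop building remaining_numbers (all positions except i and j)
def pvRemainingA (cur : List Int) (i j : Int) : List Int :=
  (PySem.List.pyRange 0 (PySem.List.len cur) 1).foldl
    (fun acc k => if k ≠ i ∧ k ≠ j then acc ++ [PySem.List.pyGetD cur k 0] else acc) []

-- A's while loop; the deque grows/pops on the right, so the stack top is the END of the list.
-- Python's 'visited' set of tuples is ported as Std.HashSet (exact for the only operations
-- used on it, membership and insert; its iteration order is never observed).
-- fuel only makes the loop total (it strictly exceeds the number of pops possible from one state).
def countdownGoA (fuel : Nat) (stack : List (List Int)) (visited : Std.HashSet (List Int))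
    (reachable : PySem.Set Int) : PySem.Set Int :=
  match fuel with
  | 0 => reachable
  | fuel + 1 =>
    match stack.getLast? with
    | none => reachable
    | some currentState =>
      let stack := stack.dropLast
      let currentNumbers := currentState
      let reachable := currentNumbers.foldl
        (fun r num => if 100 ≤ num ∧ num ≤ 999 then PySem.Set.add r num else r) reachable
      if currentNumbers.length = 1 then
        countdownGoA fuel stack visited reachable
      else
        let n := PySem.List.len currentNumbers
        let vs := (PySem.List.pyRange 0 n 1).foldl (fun vs i =>
          (PySem.List.pyRange (i + 1) n 1).foldl (fun vs j =>
            (pvNewNumbersA (PySem.List.pyGetD currentNumbers i 0)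
                (PySem.List.pyGetD currentNumbers j 0)).foldl (fun vs newNum =>
              if newNum ≤ 0 then vs
              else
                let newState := PySem.List.sorted (pvRemainingA currentNumbers i j ++ [newNum])
                  (fun x => x) false
                if vs.1.contains newState then vs
                else (vs.1.insert newState, vs.2 ++ [newState])) vs) vs)
          (visited, stack)
        countdownGoA fuel vs.2 vs.1 reachable

def countdown_dfs (numbers : List Int) : List Int :=
  let initialState := PySem.List.sorted numbers (fun x => x) false
  countdownGoA ((5 * numbers.length * numbers.length + 2) ^ (numbers.length + 1))
    [initialState] ((∅ : Std.HashSet (List Int)).insert initialState) PySem.Set.empty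

-- ===== PORT B =====
-- combos(a, b): all numbers producible from the pair (a, b), positives only
def combosB (a b : Int) : List Int :=
  let out := [a + b]
  let out := if a ≠ b then out ++ [|a - b|] else out
  let out := out ++ [a * b]
  let out := if b ≠ 0 ∧ PySem.Int.mod a b = 0 then out ++ [PySem.Int.floordiv a b] else out
  let out := if a ≠ 0 ∧ PySem.Int.mod b a = 0 then out ++ [PySem.Int.floordiv b a] else out
  out.filter (fun c => decide (0 < c))

-- explore(state): the recursive DFS sharing visited/reachable (threaded here as a pair).
-- 'while fresh: explore(fresh.pop())' pops from the end = fold over fresh.reverse.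
-- fuel only makes the recursion structural; the depth is bounded because successor states are
-- one element shorter, so with fuel = len(state)+1 at every call it is never exhausted.
def exploreB (fuel : Nat) (state : List Int) (visited : Std.HashSet (List Int))
    (reachable : PySem.Set Int) : Std.HashSet (List Int) × PySem.Set Int :=
  match fuel with
  | 0 => (visited, reachable)
  | f + 1 =>
    let reachable := state.foldl
      (fun r num => if 100 ≤ num ∧ num ≤ 999 then PySem.Set.add r num else r) reachable
    if state.length = 1 then (visited, reachable)
    else
      let vf := (PySem.List.enumerate state).foldl (fun vf ia =>
        (PySem.List.pyRange (ia.1 + 1) (PySem.List.len state) 1).foldl (fun vf j =>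
          let b := PySem.List.pyGetD state j 0
          let rest := PySem.List.slice state none (some ia.1) ++
            PySem.List.slice state (some (ia.1 + 1)) (some j) ++
            PySem.List.slice state (some (j + 1)) none
          (combosB ia.2 b).foldl (fun vf c =>
            let ns := PySem.List.sorted (rest ++ [c]) (fun x => x) false
            if vf.1.contains ns then vf else (vf.1.insert ns, vf.2 ++ [ns])) vf) vf)
        (visited, ([] : List (List Int)))
      vf.2.reverse.foldl (fun p child => exploreB f child p.1 p.2) (vf.1, reachable)

def countdown_dfs_alt (numbers : List Int) : List Int :=
  let start := PySem.List.sorted numbers (fun x => x) false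
  (exploreB (numbers.length + 1) start ((∅ : Std.HashSet (List Int)).insert start)
    PySem.Set.empty).2

-- ===== PRECONDITION & SPEC =====
def Spec_countdown_dfs (numbers : List Int) (out : List Int) : Prop := out = countdown_dfs_alt numbers
instance (numbers : List Int) (out : List Int) : Decidable (Spec_countdown_dfs numbers out) := by unfold Spec_countdown_dfs; infer_instance

-- ===== CLAIM (what is proved, stated in full; the proofs are below) =====
def Claim_equal_countdown_dfs : Prop := ∀ (numbers : List Int), Dom_countdown_dfs numbers → Spec_countdown_dfs numbers (countdown_dfs numbers)

-- ===== LEMMAS AND PROOFS =====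

-- the push step both programs perform on an unvisited child state
def pvStep (vs : Std.HashSet (List Int) × List (List Int)) (st : List Int) :
    Std.HashSet (List Int) × List (List Int) :=
  if vs.1.contains st then vs else (vs.1.insert st, vs.2 ++ [st])

-- candidate values of a pair, before the positivity filter (B's 'out' list)
def pvCandidates (a b : Int) : List Int :=
  let cands := [a + b]
  let cands := if a ≠ b then cands ++ [|a - b|] else cands
  let cands := cands ++ [a * b]
  let cands := if b ≠ 0 ∧ PySem.Int.mod a b = 0 then cands ++ [PySem.Int.floordiv a b] else cands
  if a ≠ 0 ∧ PySem.Int.mod b a = 0 then cands ++ [PySem.Int.floordiv b a] else cands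

-- the child states produced from one pair, one tail split, all splits
def pvGpair (pre mid suf : List Int) (a b : Int) : List (List Int) :=
  ((pvCandidates a b).filter (fun c => decide (0 < c))).map
    (fun c => PySem.List.sorted (pre ++ mid ++ suf ++ [c]) (fun x => x) false)

def pvGinner (a : Int) (pre : List Int) (mid : List Int) (rem2 : List Int) : List (List Int) :=
  match rem2 with
  | [] => []
  | b :: suf => pvGpair pre mid suf a b ++ pvGinner a pre (mid ++ [b]) suf

def pvGouter (pre : List Int) (rem : List Int) : List (List Int) :=
  match rem with
  | [] => []
  | a :: tail => pvGinner a pre [] tail ++ pvGouter (pre ++ [a]) tail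

theorem combosB_eq (a b : Int) :
    combosB a b = (pvCandidates a b).filter (fun c => decide (0 < c)) := rfl

theorem pvCands_eq (a b : Int) : pvNewNumbersA a b = pvCandidates a b := by
  unfold pvNewNumbersA pvCandidates
  rcases lt_trichotomy a b with h | h | h
  · simp only [if_neg (not_lt.mpr h.le), if_pos h, if_pos (ne_of_lt h)]
    rw [abs_sub_comm, abs_of_pos (sub_pos.mpr h)]
  · subst h; simp
  · simp only [if_pos h, if_pos h.ne']
    rw [abs_of_pos (sub_pos.mpr h)]

theorem pvGetAt (pre : List Int) (x : Int) (rest : List Int) :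
    PySem.List.pyGetD (pre ++ x :: rest) (pre.length : Int) 0 = x := by
  simp [PySem.List.pyGetD_natCast, List.getD]

theorem pvSeg (w : List Int) : ∀ (pre post : List Int),
    (PySem.List.pyRange (pre.length : Int) ((pre.length : Int) + (w.length : Int)) 1).map
      (fun k => PySem.List.pyGetD (pre ++ (w ++ post)) k 0) = w := by
  induction w with
  | nil => intro pre post; simp [PySem.List.pyRange_one_eq_nil]
  | cons x w' ih =>
    intro pre post
    rw [PySem.List.pyRange_one_cons (by push_cast [List.length_cons]; omega), List.map_cons]
    have hh : pre ++ (x :: w' ++ post) = pre ++ x :: (w' ++ post) := by simp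
    congr 1
    · rw [hh]; exact pvGetAt pre x (w' ++ post)
    · have e1 : (pre.length : Int) + 1 = (((pre ++ [x]).length : Nat) : Int) := by
        push_cast [List.length_append, List.length_cons, List.length_nil]; omega
      have e2 : (pre.length : Int) + ((x :: w').length : Int)
          = (((pre ++ [x]).length : Nat) : Int) + (w'.length : Int) := by
        push_cast [List.length_append, List.length_cons, List.length_nil]; omega
      rw [e1, e2, hh, show pre ++ x :: (w' ++ post) = (pre ++ [x]) ++ (w' ++ post) by simp]
      exact ih (pre ++ [x]) post

theorem pvRemaining_eq (pre mid suf : List Int) (a b : Int) :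
    pvRemainingA (pre ++ a :: (mid ++ b :: suf)) (pre.length : Int)
      ((pre.length : Int) + 1 + (mid.length : Int)) = pre ++ mid ++ suf := by
  have hlen : PySem.List.len (pre ++ a :: (mid ++ b :: suf))
      = (pre.length : Int) + 1 + (mid.length : Int) + 1 + (suf.length : Int) := by
    simp [PySem.List.len_eq]; ring
  unfold pvRemainingA
  rw [PySem.List.foldl_append_ite, hlen, List.nil_append]
  rw [PySem.List.pyRange_one_append 0 (pre.length : Int)
        ((pre.length : Int) + 1 + (mid.length : Int) + 1 + (suf.length : Int))
        (by omega) (by omega),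
      PySem.List.pyRange_one_cons (a := (pre.length : Int)) (by omega),
      PySem.List.pyRange_one_append ((pre.length : Int) + 1)
        ((pre.length : Int) + 1 + (mid.length : Int))
        ((pre.length : Int) + 1 + (mid.length : Int) + 1 + (suf.length : Int))
        (by omega) (by omega),
      PySem.List.pyRange_one_cons (a := (pre.length : Int) + 1 + (mid.length : Int))
        (by omega)]
  rw [List.filter_append, List.filter_cons_of_neg (by simp), List.filter_append,
      List.filter_cons_of_neg (by simp)]
  rw [List.filter_eq_self.mpr (fun k hk => by
        have h := (PySem.List.mem_pyRange_one).mp hk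
        simp only [decide_eq_true_eq]; omega),
      List.filter_eq_self.mpr (fun k hk => by
        have h := (PySem.List.mem_pyRange_one).mp hk
        simp only [decide_eq_true_eq]; omega),
      List.filter_eq_self.mpr (fun k hk => by
        have h := (PySem.List.mem_pyRange_one).mp hk
        simp only [decide_eq_true_eq]; omega)]
  rw [List.map_append, List.map_append]
  have s1 := pvSeg pre [] (a :: (mid ++ b :: suf))
  have s2 := pvSeg mid (pre ++ [a]) (b :: suf)
  have s3 := pvSeg suf (pre ++ a :: (mid ++ [b])) []
  simp only [List.length_nil, List.length_append, List.length_cons, List.nil_append,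
    List.append_nil, Nat.cast_zero, Nat.cast_add, Nat.cast_one, zero_add,
    List.append_assoc, List.cons_append] at s1 s2 s3 ⊢
  rw [s1, s2]
  congr 1
  congr 1
  have e : (pre.length : Int) + ((mid.length : Int) + 1 + 1)
      = (pre.length : Int) + 1 + (mid.length : Int) + 1 := by ring
  rw [e] at s3
  exact s3

-- A's innermost fold over pair (i, j) is the pvStep-fold over pvGpair
theorem pvPairBody_eq (pre mid suf : List Int) (a b : Int)
    (vs : Std.HashSet (List Int) × List (List Int)) :
    (pvNewNumbersA a b).foldl (fun vs newNum =>
        if newNum ≤ 0 then vs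
        else
          let newState := PySem.List.sorted
            (pvRemainingA (pre ++ a :: (mid ++ b :: suf)) (pre.length : Int)
              ((pre.length : Int) + 1 + (mid.length : Int)) ++ [newNum]) (fun x => x) false
          if vs.1.contains newState then vs
          else (vs.1.insert newState, vs.2 ++ [newState])) vs
      = (pvGpair pre mid suf a b).foldl pvStep vs := by
  rw [pvCands_eq, pvRemaining_eq]
  rw [pvGpair, List.foldl_map]
  rw [← PySem.List.foldl_ite_eq_foldl_filter (fun c => 0 < c)]
  apply PySem.List.foldl_congr_mem
  intro acc c _
  by_cases h : c ≤ 0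
  · rw [if_pos h, if_neg (not_lt.mpr h)]
  · rw [if_neg h, if_pos (not_le.mp h)]
    simp only [pvStep, List.append_assoc]

theorem pvInnerLoopA_eq (a : Int) (pre : List Int) :
    ∀ (rem2 mid : List Int) (vs : Std.HashSet (List Int) × List (List Int)),
    (PySem.List.pyRange ((pre.length : Int) + 1 + (mid.length : Int))
        (PySem.List.len (pre ++ a :: (mid ++ rem2))) 1).foldl (fun vs j =>
      (pvNewNumbersA (PySem.List.pyGetD (pre ++ a :: (mid ++ rem2)) (pre.length : Int) 0)
          (PySem.List.pyGetD (pre ++ a :: (mid ++ rem2)) j 0)).foldl (fun vs newNum =>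
        if newNum ≤ 0 then vs
        else
          let newState := PySem.List.sorted
            (pvRemainingA (pre ++ a :: (mid ++ rem2)) (pre.length : Int) j ++ [newNum])
            (fun x => x) false
          if vs.1.contains newState then vs
          else (vs.1.insert newState, vs.2 ++ [newState])) vs) vs
      = (pvGinner a pre mid rem2).foldl pvStep vs := by
  intro rem2
  induction rem2 with
  | nil =>
    intro mid vs
    rw [PySem.List.pyRange_one_eq_nil (by simp only [PySem.List.len_eq, List.length_append, List.length_cons, List.length_nil]; push_cast; omega)]
    rfl
  | cons b suf ih =>
    intro mid vs
    have hb : PySem.List.pyGetD (pre ++ a :: (mid ++ b :: suf))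
        ((pre.length : Int) + 1 + (mid.length : Int)) 0 = b := by
      have := pvGetAt (pre ++ a :: mid) b suf
      simp only [List.length_append, List.length_cons, Nat.cast_add, Nat.cast_one,
        List.append_assoc, List.cons_append] at this ⊢
      rw [show (pre.length : Int) + 1 + (mid.length : Int)
          = (pre.length : Int) + ((mid.length : Int) + 1) by ring]
      exact this
    have ha : PySem.List.pyGetD (pre ++ a :: (mid ++ b :: suf)) ((pre.length : Int)) 0 = a :=
      pvGetAt pre a (mid ++ b :: suf)
    rw [PySem.List.pyRange_one_cons (by simp only [PySem.List.len_eq, List.length_append, List.length_cons]; push_cast; omega),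
        List.foldl_cons, ha, hb, pvPairBody_eq, pvGinner, List.foldl_append]
    have := ih (mid ++ [b]) ((pvGpair pre mid suf a b).foldl pvStep vs)
    simp only [List.length_append, List.length_cons, List.length_nil, Nat.cast_add,
      Nat.cast_one, Nat.cast_zero, List.append_assoc, List.cons_append, List.nil_append]
      at this ⊢
    rw [show (pre.length : Int) + 1 + ((mid.length : Int) + (0 + 1))
        = (pre.length : Int) + 1 + (mid.length : Int) + 1 by ring] at this
    rw [ha] at this
    exact this

theorem pvPairsA_eq : ∀ (rem pre : List Int) (vs : Std.HashSet (List Int) × List (List Int)),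
    (PySem.List.pyRange (pre.length : Int) (PySem.List.len (pre ++ rem)) 1).foldl (fun vs i =>
      (PySem.List.pyRange (i + 1) (PySem.List.len (pre ++ rem)) 1).foldl (fun vs j =>
        (pvNewNumbersA (PySem.List.pyGetD (pre ++ rem) i 0)
            (PySem.List.pyGetD (pre ++ rem) j 0)).foldl (fun vs newNum =>
          if newNum ≤ 0 then vs
          else
            let newState := PySem.List.sorted
              (pvRemainingA (pre ++ rem) i j ++ [newNum]) (fun x => x) false
            if vs.1.contains newState then vs
            else (vs.1.insert newState, vs.2 ++ [newState])) vs) vs) vs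
      = (pvGouter pre rem).foldl pvStep vs := by
  intro rem
  induction rem with
  | nil =>
    intro pre vs
    rw [PySem.List.pyRange_one_eq_nil (by simp only [PySem.List.len_eq, List.length_append, List.length_nil]; push_cast; omega)]
    rfl
  | cons x tail ih =>
    intro pre vs
    rw [PySem.List.pyRange_one_cons (by simp only [PySem.List.len_eq, List.length_append, List.length_cons]; push_cast; omega),
        List.foldl_cons, pvGouter, List.foldl_append]
    have hinner := pvInnerLoopA_eq x pre tail [] vs
    simp only [List.length_nil, Nat.cast_zero, add_zero, List.nil_append] at hinner
    rw [hinner]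
    have := ih (pre ++ [x]) ((pvGinner x pre [] tail).foldl pvStep vs)
    simp only [List.length_append, List.length_cons, List.length_nil, Nat.cast_add,
      Nat.cast_one, Nat.cast_zero, List.append_assoc, List.cons_append, List.nil_append]
      at this ⊢
    rw [show (pre.length : Int) + (0 + 1) = (pre.length : Int) + 1 by ring] at this
    exact this

theorem pvPush (l : List (List Int)) : ∀ (v : Std.HashSet (List Int)) (s : List (List Int)),
    l.foldl pvStep (v, s) = ((l.foldl pvStep (v, [])).1, s ++ (l.foldl pvStep (v, [])).2) := by
  induction l with
  | nil => intro v s; simp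
  | cons x t ih =>
    intro v s
    by_cases h : v.contains x = true
    · simp only [List.foldl_cons, pvStep, if_pos h]; exact ih v s
    · simp only [List.foldl_cons, pvStep, if_neg h, List.nil_append]
      rw [ih (v.insert x) (s ++ [x]), ih (v.insert x) [x], List.append_assoc]

-- ---------- the abstract front-pop stack machine shared by the two directions ----------
def pvCollect (s : List Int) (r : PySem.Set Int) : PySem.Set Int :=
  s.foldl (fun r num => if 100 ≤ num ∧ num ≤ 999 then PySem.Set.add r num else r) r

def pvRunF : Nat → List (List Int) → Std.HashSet (List Int) → PySem.Set Int →
    Std.HashSet (List Int) × PySem.Set Int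
  | 0, _, v, r => (v, r)
  | _ + 1, [], v, r => (v, r)
  | f + 1, s :: rest, v, r =>
    let r := pvCollect s r
    if s.length = 1 then pvRunF f rest v r
    else
      let vf := (pvGouter [] s).foldl pvStep (v, [])
      pvRunF f (vf.2.reverse ++ rest) vf.1 r

theorem pvMainPair : ∀ (fuel : Nat) (stackA : List (List Int)) (v : Std.HashSet (List Int))
    (r : PySem.Set Int), countdownGoA fuel stackA v r = (pvRunF fuel stackA.reverse v r).2 := by
  intro fuel
  induction fuel with
  | zero => intro stackA v r; rfl
  | succ fuel ih =>
    intro stackA v r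
    rcases h : stackA.reverse with _ | ⟨cur, restRev⟩
    · have : stackA = [] := by simpa using congrArg List.reverse h
      subst this; rfl
    · have hA : stackA = restRev.reverse ++ [cur] := by
        have := congrArg List.reverse h; simpa using this
      subst hA
      rw [countdownGoA]
      simp only [List.getLast?_concat, List.dropLast_concat]
      simp only [pvRunF]
      by_cases h1 : cur.length = 1
      · rw [if_pos h1, if_pos h1]
        have := ih restRev.reverse v (pvCollect cur r)
        simpa [pvCollect] using this
      · rw [if_neg h1, if_neg h1]
        have hp := pvPairsA_eq cur [] (v, restRev.reverse)
        simp only [List.nil_append, List.length_nil, Nat.cast_zero] at hp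
        rw [hp, pvPush (pvGouter [] cur) v restRev.reverse]
        have := ih (restRev.reverse ++ (List.foldl pvStep (v, []) (pvGouter [] cur)).2)
          (List.foldl pvStep (v, []) (pvGouter [] cur)).1 (pvCollect cur r)
        simpa [pvCollect] using this

-- ---------- B's generation loop produces the pvStep-fold over pvGouter ----------
theorem pvPairBodyB_eq (pre mid suf : List Int) (a b : Int)
    (vf : Std.HashSet (List Int) × List (List Int)) :
    (combosB a b).foldl (fun vf c =>
      if vf.1.contains (PySem.List.sorted (pre ++ (mid ++ (suf ++ [c]))) (fun x => x) false) then vf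
      else (vf.1.insert (PySem.List.sorted (pre ++ (mid ++ (suf ++ [c]))) (fun x => x) false),
        vf.2 ++ [PySem.List.sorted (pre ++ (mid ++ (suf ++ [c]))) (fun x => x) false])) vf
      = (pvGpair pre mid suf a b).foldl pvStep vf := by
  rw [pvGpair, ← combosB_eq, List.foldl_map]
  apply PySem.List.foldl_congr_mem
  intro acc c _
  simp only [pvStep, List.append_assoc]

theorem pvInnerB_eq (s : List Int) (a : Int) (pre : List Int) :
    ∀ (rem2 mid : List Int), s = pre ++ a :: (mid ++ rem2) →
    ∀ (vf : Std.HashSet (List Int) × List (List Int)),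
    (PySem.List.pyRange ((pre.length : Int) + 1 + (mid.length : Int))
        (PySem.List.len s) 1).foldl (fun vf j =>
      let b := PySem.List.pyGetD s j 0
      let rest := PySem.List.slice s none (some ((pre.length : Int))) ++
        PySem.List.slice s (some ((pre.length : Int) + 1)) (some j) ++
        PySem.List.slice s (some (j + 1)) none
      (combosB a b).foldl (fun vf c =>
        let ns := PySem.List.sorted (rest ++ [c]) (fun x => x) false
        if vf.1.contains ns then vf else (vf.1.insert ns, vf.2 ++ [ns])) vf) vf
      = (pvGinner a pre mid rem2).foldl pvStep vf := by
  intro rem2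
  induction rem2 with
  | nil =>
    intro mid h vf
    rw [PySem.List.pyRange_one_eq_nil (by
      subst h
      simp only [PySem.List.len_eq, List.length_append, List.length_cons, List.length_nil]
      push_cast; omega)]
    rfl
  | cons b suf ih =>
    intro mid h vf
    subst h
    have hj : ((pre.length : Int) + 1 + (mid.length : Int))
        < PySem.List.len (pre ++ a :: (mid ++ b :: suf)) := by
      simp only [PySem.List.len_eq, List.length_append, List.length_cons]
      push_cast; omega
    rw [PySem.List.pyRange_one_cons hj, List.foldl_cons, pvGinner, List.foldl_append]
    have ih' := ih (mid ++ [b]) (by simp)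
    simp only [List.length_append, List.length_cons, List.length_nil, Nat.cast_add,
      Nat.cast_one, Nat.cast_zero, List.append_assoc] at ih' ⊢
    rw [show (pre.length : Int) + 1 + ((mid.length : Int) + (0 + 1))
        = (pre.length : Int) + 1 + (mid.length : Int) + 1 by ring] at ih'
    rw [ih']
    congr 1
    -- the head application: evaluate b, the three slices, then the pair fold
    have hb : PySem.List.pyGetD (pre ++ a :: (mid ++ b :: suf))
        ((pre.length : Int) + 1 + (mid.length : Int)) 0 = b := by
      have := pvGetAt (pre ++ a :: mid) b suf
      simp only [List.length_append, List.length_cons, Nat.cast_add, Nat.cast_one,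
        List.append_assoc, List.cons_append] at this ⊢
      rw [show (pre.length : Int) + 1 + (mid.length : Int)
          = (pre.length : Int) + ((mid.length : Int) + 1) by ring]
      exact this
    have hsl1 : PySem.List.slice (pre ++ a :: (mid ++ b :: suf)) none
        (some ((pre.length : Int))) = pre := by
      rw [PySem.List.slice_to_natCast, List.take_left]
    have hsl2 : PySem.List.slice (pre ++ a :: (mid ++ b :: suf))
        (some ((pre.length : Int) + 1))
        (some ((pre.length : Int) + 1 + (mid.length : Int))) = mid := by
      rw [show (pre.length : Int) + 1 = ((pre.length + 1 : Nat) : Int) by push_cast; ring,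
          show ((pre.length + 1 : Nat) : Int) + (mid.length : Int)
            = ((pre.length + 1 + mid.length : Nat) : Int) by push_cast; ring,
          PySem.List.slice_natCast,
          show pre.length + 1 + mid.length - (pre.length + 1) = mid.length by omega,
          show pre ++ a :: (mid ++ b :: suf) = (pre ++ [a]) ++ (mid ++ b :: suf) by simp,
          show pre.length + 1 = (pre ++ [a]).length by simp,
          List.drop_left, List.take_left]
    have hsl3 : PySem.List.slice (pre ++ a :: (mid ++ b :: suf))
        (some ((pre.length : Int) + 1 + (mid.length : Int) + 1)) none = suf := by
      rw [show (pre.length : Int) + 1 + (mid.length : Int) + 1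
            = ((pre.length + 1 + mid.length + 1 : Nat) : Int) by push_cast; ring,
          PySem.List.slice_from_natCast,
          show pre ++ a :: (mid ++ b :: suf) = (pre ++ a :: (mid ++ [b])) ++ suf by simp,
          show pre.length + 1 + mid.length + 1 = (pre ++ a :: (mid ++ [b])).length by
            simp; omega,
          List.drop_left]
    simp only [hb, hsl1, hsl2, hsl3]
    exact pvPairBodyB_eq pre mid suf a b vf

theorem pvOuterB_eq (s : List Int) : ∀ (rem pre : List Int), s = pre ++ rem →
    ∀ (vf : Std.HashSet (List Int) × List (List Int)),
    (PySem.List.enumerate rem ((pre.length : Nat) : Int)).foldl (fun vf ia =>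
      (PySem.List.pyRange (ia.1 + 1) (PySem.List.len s) 1).foldl (fun vf j =>
        let b := PySem.List.pyGetD s j 0
        let rest := PySem.List.slice s none (some ia.1) ++
          PySem.List.slice s (some (ia.1 + 1)) (some j) ++
          PySem.List.slice s (some (j + 1)) none
        (combosB ia.2 b).foldl (fun vf c =>
          let ns := PySem.List.sorted (rest ++ [c]) (fun x => x) false
          if vf.1.contains ns then vf else (vf.1.insert ns, vf.2 ++ [ns])) vf) vf) vf
      = (pvGouter pre rem).foldl pvStep vf := by
  intro rem
  induction rem with
  | nil => intro pre _ vf; rfl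
  | cons a tail ih =>
    intro pre h vf
    rw [PySem.List.enumerate_cons, List.foldl_cons, pvGouter, List.foldl_append]
    have hin := pvInnerB_eq s a pre tail [] (by simpa using h)
    simp only [List.length_nil, Nat.cast_zero, add_zero] at hin
    have ih' := ih (pre ++ [a]) (by rw [h]; simp)
    simp only [List.length_append, List.length_cons, List.length_nil, Nat.cast_add,
      Nat.cast_one, Nat.cast_zero] at ih' ⊢
    rw [show (pre.length : Int) + (0 + 1) = (pre.length : Int) + 1 by ring] at ih'
    rw [ih']
    congr 1
    exact hin vf

-- ---------- size and membership facts about the generated children ----------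
theorem pvGpair_mem_len {t : List Int} (pre mid suf : List Int) (a b : Int)
    (h : t ∈ pvGpair pre mid suf a b) :
    t.length = pre.length + mid.length + suf.length + 1 := by
  rcases List.mem_map.mp h with ⟨c, _, rfl⟩
  simp [PySem.List.length_sorted]
  omega

theorem pvGinner_mem_len {t : List Int} (a : Int) (pre : List Int) :
    ∀ (rem2 mid : List Int), t ∈ pvGinner a pre mid rem2 →
    t.length = pre.length + mid.length + rem2.length := by
  intro rem2
  induction rem2 with
  | nil => intro mid h; simp [pvGinner] at h
  | cons b suf ih =>
    intro mid h
    rw [pvGinner, List.mem_append] at h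
    rcases h with h | h
    · have := pvGpair_mem_len pre mid suf a b h; simp [this]; omega
    · have := ih (mid ++ [b]) h; simp at this ⊢; omega

theorem pvGouter_mem_len {t : List Int} :
    ∀ (rem pre : List Int), t ∈ pvGouter pre rem →
    t.length + 1 = pre.length + rem.length := by
  intro rem
  induction rem with
  | nil => intro pre h; simp [pvGouter] at h
  | cons a tail ih =>
    intro pre h
    rw [pvGouter, List.mem_append] at h
    rcases h with h | h
    · have := pvGinner_mem_len a pre tail [] h; simp at this ⊢; omega
    · have := ih (pre ++ [a]) h; simp at this ⊢; omega

theorem pvCandidates_len_le (a b : Int) : (pvCandidates a b).length ≤ 5 := by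
  unfold pvCandidates
  split_ifs <;> simp

theorem pvGpair_len_le (pre mid suf : List Int) (a b : Int) :
    (pvGpair pre mid suf a b).length ≤ 5 := by
  rw [pvGpair, List.length_map]
  exact le_trans (List.length_filter_le _ _) (pvCandidates_len_le a b)

theorem pvGinner_len_le (a : Int) (pre : List Int) :
    ∀ (rem2 mid : List Int), (pvGinner a pre mid rem2).length ≤ 5 * rem2.length := by
  intro rem2
  induction rem2 with
  | nil => intro mid; simp [pvGinner]
  | cons b suf ih =>
    intro mid
    rw [pvGinner, List.length_append]
    have h1 := pvGpair_len_le pre mid suf a b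
    have h2 := ih (mid ++ [b])
    simp only [List.length_cons]
    omega

theorem pvGouter_len_le : ∀ (rem pre : List Int),
    (pvGouter pre rem).length ≤ 5 * rem.length * rem.length := by
  intro rem
  induction rem with
  | nil => intro pre; simp [pvGouter]
  | cons a tail ih =>
    intro pre
    rw [pvGouter, List.length_append]
    have h1 := pvGinner_len_le a pre tail []
    have h2 := ih (pre ++ [a])
    simp only [List.length_cons]
    nlinarith

-- the appended part of a pvStep fold: a sublist-like portion of the folded list
theorem pvStep_snd (l : List (List Int)) : ∀ (v : Std.HashSet (List Int)),
    (l.foldl pvStep (v, [])).2.length ≤ l.length ∧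
    ∀ x ∈ (l.foldl pvStep (v, [])).2, x ∈ l := by
  induction l with
  | nil => intro v; simp
  | cons x t ih =>
    intro v
    by_cases h : v.contains x = true
    · simp only [List.foldl_cons, pvStep, if_pos h]
      refine ⟨le_trans (ih v).1 (by simp), fun y hy => List.mem_cons_of_mem x ((ih v).2 y hy)⟩
    · simp only [List.foldl_cons, pvStep, if_neg h, List.nil_append]
      rw [pvPush t (v.insert x) [x]]
      constructor
      · simp only [List.length_append, List.length_cons, List.length_nil]
        have := (ih (v.insert x)).1; omega
      · intro y hy
        rcases List.mem_append.mp hy with hy | hy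
        · simp at hy; simp [hy]
        · exact List.mem_cons_of_mem x ((ih (v.insert x)).2 y hy)

-- ---------- the bridge: the stack machine equals the recursive DFS ----------
def pvMu (C : Nat) (st : List (List Int)) : Nat := (st.map (fun s => C ^ s.length)).sum

def pvSeqB (st : List (List Int)) (p : Std.HashSet (List Int) × PySem.Set Int) :
    Std.HashSet (List Int) × PySem.Set Int :=
  st.foldl (fun p s => exploreB (s.length + 1) s p.1 p.2) p

theorem pvMu_const (C : Nat) (k : Nat) : ∀ (l : List (List Int)),
    (∀ x ∈ l, x.length = k) → pvMu C l = l.length * C ^ k := by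
  intro l
  induction l with
  | nil => intro _; simp [pvMu]
  | cons x t ih =>
    intro h
    have hx := h x (List.mem_cons_self)
    have ht := ih (fun y hy => h y (List.mem_cons_of_mem x hy))
    simp only [pvMu, List.map_cons, List.sum_cons, List.length_cons] at ht ⊢
    rw [hx, ht]
    ring

theorem pvBridge (n0 : Nat) : ∀ (f : Nat) (st : List (List Int))
    (v : Std.HashSet (List Int)) (r : PySem.Set Int),
    (∀ s ∈ st, s.length ≤ n0) → pvMu (5 * n0 * n0 + 2) st ≤ f →
    pvRunF f st v r = pvSeqB st (v, r) := by
  intro f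
  induction f with
  | zero =>
    intro st v r _ hmu
    cases st with
    | nil => rfl
    | cons s rest =>
      exfalso
      have hp : 0 < (5 * n0 * n0 + 2) ^ s.length := Nat.pow_pos (by omega)
      simp only [pvMu, List.map_cons, List.sum_cons, Nat.le_zero] at hmu
      omega
  | succ f ih =>
    intro st v r hlen hmu
    cases st with
    | nil => rfl
    | cons s rest =>
      have hCge : 2 ≤ 5 * n0 * n0 + 2 := by omega
      have hmu' : (5 * n0 * n0 + 2) ^ s.length + pvMu (5 * n0 * n0 + 2) rest ≤ f + 1 := by
        simpa [pvMu] using hmu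
      have hrest : ∀ t ∈ rest, t.length ≤ n0 := fun t ht => hlen t (List.mem_cons_of_mem s ht)
      simp only [pvRunF]
      rw [show pvSeqB (s :: rest) (v, r) = pvSeqB rest (exploreB (s.length + 1) s v r) from rfl]
      by_cases h1 : s.length = 1
      · rw [if_pos h1]
        have hexp : exploreB (s.length + 1) s v r = (v, pvCollect s r) := by
          simp [exploreB, h1, pvCollect]
        rw [hexp]
        apply ih rest v (pvCollect s r) hrest
        rw [h1, pow_one] at hmu'
        omega
      · rw [if_neg h1]
        have hgen := pvOuterB_eq s s [] rfl (v, ([] : List (List Int)))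
        simp only [List.length_nil, Nat.cast_zero] at hgen
        set vf := (pvGouter [] s).foldl pvStep (v, ([] : List (List Int))) with hvf
        have hmemlen : ∀ c ∈ vf.2, c.length + 1 = s.length := by
          intro c hc
          have hm : c ∈ pvGouter [] s := (pvStep_snd (pvGouter [] s) v).2 c hc
          have := pvGouter_mem_len _ _ hm
          simpa using this
        have hexp : exploreB (s.length + 1) s v r
            = pvSeqB vf.2.reverse (vf.1, pvCollect s r) := by
          simp only [exploreB, if_neg h1, pvCollect]
          rw [hgen]
          unfold pvSeqB
          apply PySem.List.foldl_congr_mem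
          intro p c hc
          have hl := hmemlen c (List.mem_reverse.mp hc)
          rw [hl]
        rw [hexp]
        rw [show pvSeqB rest (pvSeqB vf.2.reverse (vf.1, pvCollect s r))
            = pvSeqB (vf.2.reverse ++ rest) (vf.1, pvCollect s r) from
          (by unfold pvSeqB; rw [List.foldl_append])]
        apply ih (vf.2.reverse ++ rest) vf.1 (pvCollect s r)
        · intro t ht
          rcases List.mem_append.mp ht with ht | ht
          · have := hmemlen t (List.mem_reverse.mp ht)
            have hs := hlen s (List.mem_cons_self)
            omega
          · exact hrest t ht
        · -- the potential decreases: the popped state outweighs its pushed children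
          have hmuapp : pvMu (5 * n0 * n0 + 2) (vf.2.reverse ++ rest)
              = pvMu (5 * n0 * n0 + 2) vf.2 + pvMu (5 * n0 * n0 + 2) rest := by
            simp [pvMu, List.map_reverse, List.sum_reverse]
          rw [hmuapp]
          rcases Nat.eq_zero_or_pos s.length with h0 | hpos
          · have hs0 : s = [] := List.length_eq_zero_iff.mp h0
            have hvf2 : vf.2 = [] := by rw [hvf, hs0]; rfl
            rw [hvf2]
            have hnil : pvMu (5 * n0 * n0 + 2) ([] : List (List Int)) = 0 := rfl
            rw [h0, pow_zero] at hmu'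
            omega
          · have hL2 : 2 ≤ s.length := by omega
            have hmuvf : pvMu (5 * n0 * n0 + 2) vf.2
                = vf.2.length * (5 * n0 * n0 + 2) ^ (s.length - 1) :=
              pvMu_const _ _ _ (fun x hx => by have := hmemlen x hx; omega)
            rw [hmuvf]
            have hcard : vf.2.length ≤ 5 * n0 * n0 := by
              have h1' := (pvStep_snd (pvGouter [] s) v).1
              rw [← hvf] at h1'
              have h2' := pvGouter_len_le s []
              have h3' := hlen s (List.mem_cons_self)
              have : 5 * s.length * s.length ≤ 5 * n0 * n0 := by
                have := Nat.mul_le_mul (Nat.mul_le_mul_left 5 h3') h3'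
                omega
              omega
            have hXge : 2 ≤ (5 * n0 * n0 + 2) ^ (s.length - 1) := by
              calc 2 ≤ 5 * n0 * n0 + 2 := hCge
              _ = (5 * n0 * n0 + 2) ^ 1 := (pow_one _).symm
              _ ≤ (5 * n0 * n0 + 2) ^ (s.length - 1) :=
                Nat.pow_le_pow_right (by omega) (by omega)
            have hpow : (5 * n0 * n0 + 2) ^ s.length
                = (5 * n0 * n0 + 2) * (5 * n0 * n0 + 2) ^ (s.length - 1) := by
              rw [← pow_succ']
              congr 1
              omega
            rw [hpow] at hmu'
            have hA : vf.2.length * (5 * n0 * n0 + 2) ^ (s.length - 1)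
                ≤ (5 * n0 * n0) * (5 * n0 * n0 + 2) ^ (s.length - 1) :=
              Nat.mul_le_mul_right _ hcard
            have hB : (5 * n0 * n0) * (5 * n0 * n0 + 2) ^ (s.length - 1)
                + 2 * (5 * n0 * n0 + 2) ^ (s.length - 1)
                = (5 * n0 * n0 + 2) * (5 * n0 * n0 + 2) ^ (s.length - 1) := by
              rw [← Nat.add_mul]
            omega

-- ===== VERDICT (by name: the statement is the Claim_ definition above) =====
theorem countdown_dfs_spec : Claim_equal_countdown_dfs := by
  intro numbers _
  unfold Spec_countdown_dfs countdown_dfs countdown_dfs_alt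
  have hlen : (PySem.List.sorted numbers (fun x => x) false).length = numbers.length :=
    PySem.List.length_sorted _ _ _
  have hmain := pvMainPair ((5 * numbers.length * numbers.length + 2) ^ (numbers.length + 1))
    [PySem.List.sorted numbers (fun x => x) false]
    ((∅ : Std.HashSet (List Int)).insert (PySem.List.sorted numbers (fun x => x) false))
    PySem.Set.empty
  simp only [List.reverse_cons, List.reverse_nil, List.nil_append] at hmain
  rw [hmain]
  rw [pvBridge numbers.length _ _ _ _
    (by intro s hs; simp at hs; subst hs; omega)
    (by
      show pvMu _ _ ≤ _
      simp only [pvMu, List.map_cons, List.map_nil, List.sum_cons, List.sum_nil, Nat.add_zero,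
        hlen]
      exact Nat.pow_le_pow_right (by omega) (by omega))]
  simp only [pvSeqB, List.foldl_cons, List.foldl_nil, hlen]
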